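-- pv_equiv track=rewrite | github.com/MustafaHaddara/google-code-jam-2019 | r1b/03-fight.py | find_fair
-- ===== SOURCE A (Python) =====
-- def find_fair(c_skills, d_skills, e):
--     max_len = len(c_skills)
--     start = 0
--     end = 0
--
--     num_fair = 0
--
--     c_max = c_skills[start]
--     d_max = d_skills[start]
--     while start < max_len:
--         c_next = c_skills[end]
--         d_next = d_skills[end]
--
--         if c_next>c_max:
--             c_max = c_next
--         if d_next>d_max:
--             d_max = d_next
--
--         if abs(c_max-d_max) <= e:
--             num_fair += 1
--
--         end += 1
--         if end >= max_len:
--             start += 1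
--             if start == max_len:
--                 break
--             end = start
--             if end == max_len:
--                 end = start
--             c_max = c_skills[start]
--             d_max = d_skills[start]
--
--     return num_fair
-- ===== SOURCE B (Python) =====
-- def find_fair(c_skills, d_skills, e):
--     # Divide and conquer: count fair subarrays inside each half recursively,
--     # and count the subarrays crossing the midpoint from precomputed
--     # suffix maxima of the left half and prefix maxima of the right half.
--     def count(lo, hi):
--         if hi < lo:
--             return 0
--         if lo == hi:
--             return 1 if abs(c_skills[lo] - d_skills[lo]) <= e else 0
--         mid = (lo + hi) // 2
--         total = count(lo, mid) + count(mid + 1, hi)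
--         lc, ld = [], []
--         cm, dm = c_skills[mid], d_skills[mid]
--         for s in range(mid, lo - 1, -1):
--             cm = max(cm, c_skills[s])
--             dm = max(dm, d_skills[s])
--             lc.append(cm)
--             ld.append(dm)
--         rc, rd = [], []
--         cm, dm = c_skills[mid + 1], d_skills[mid + 1]
--         for t in range(mid + 1, hi + 1):
--             cm = max(cm, c_skills[t])
--             dm = max(dm, d_skills[t])
--             rc.append(cm)
--             rd.append(dm)
--         for cl, dl in zip(lc, ld):
--             for cr, dr in zip(rc, rd):
--                 if -e <= (cl if cl > cr else cr) - (dl if dl > dr else dr) <= e: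
--                     total += 1
--         return total
--     return count(0, len(c_skills) - 1)
-- ===== Notes on version B (the rewrite author's own statement) =====
-- stated objective: alternative
-- what changed: A enumerates every subarray with a flat while-loop state machine that fixes the left endpoint and extends rightwards maintaining running maxima; B is a divide-and-conquer: it recursively counts fair subarrays inside each half and counts the midpoint-crossing subarrays from precomputed suffix-maxima arrays of the left half and prefix-maxima arrays of the right half.
import Mathlib
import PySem

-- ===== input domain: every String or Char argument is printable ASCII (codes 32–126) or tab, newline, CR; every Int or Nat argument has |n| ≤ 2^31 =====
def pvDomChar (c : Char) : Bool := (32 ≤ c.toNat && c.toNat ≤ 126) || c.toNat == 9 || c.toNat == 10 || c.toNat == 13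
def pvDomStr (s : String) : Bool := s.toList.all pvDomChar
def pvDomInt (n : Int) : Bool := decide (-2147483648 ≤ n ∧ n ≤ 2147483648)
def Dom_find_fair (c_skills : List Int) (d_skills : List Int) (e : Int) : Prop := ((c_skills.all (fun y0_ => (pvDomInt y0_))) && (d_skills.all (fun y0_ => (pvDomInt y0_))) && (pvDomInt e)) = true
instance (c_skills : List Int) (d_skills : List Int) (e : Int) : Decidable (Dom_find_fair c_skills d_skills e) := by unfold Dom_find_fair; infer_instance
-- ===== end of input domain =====

-- B replaces A's flat while-loop subarray enumeration by divide and conquer: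
-- recurse on the two halves and count midpoint-crossing subarrays from
-- precomputed suffix/prefix maxima arrays; same asymptotic cost, different algorithm.

-- ===== PORT A =====
-- A's while loop as one recursive state machine; list indices are always ≥ 0 here,
-- so xs.getD i 0 is Python's xs[i] exactly when i is in range (out-of-range raises
-- in Python and is excluded by Pre_find_fair).
def loopA (c d : List Int) (e : Int) (n start endi : Nat)
    (cMax dMax numFair : Int) : Int :=
  if _h : start < n then
    let cNext := c.getD endi 0
    let dNext := d.getD endi 0
    let cMax' := if cNext > cMax then cNext else cMax
    let dMax' := if dNext > dMax then dNext else dMax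
    let numFair' := if |cMax' - dMax'| ≤ e then numFair + 1 else numFair
    if _h2 : endi + 1 ≥ n then
      if start + 1 = n then numFair'
      -- Python's 'end = start; if end == max_len: end = start' re-assigns the same value
      else loopA c d e n (start+1) (start+1) (c.getD (start+1) 0) (d.getD (start+1) 0) numFair'
    else loopA c d e n start (endi+1) cMax' dMax' numFair'
  else numFair
termination_by (n - start, n - endi)
decreasing_by
  · apply Prod.Lex.left; omega
  · apply Prod.Lex.right; omega

def find_fair (c_skills : List Int) (d_skills : List Int) (e : Int) : Int :=
  loopA c_skills d_skills e c_skills.length 0 0 (c_skills.getD 0 0) (d_skills.getD 0 0) 0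

-- ===== PORT B =====
-- 'for s in range(mid, lo-1, -1)' building the suffix-maxima lists lc, ld:
-- structural recursion on the iteration count k, s decreasing
def buildDown (c d : List Int) (k s : Nat) (cm dm : Int) (lc ld : List Int) :
    List Int × List Int :=
  match k with
  | 0 => (lc, ld)
  | k' + 1 =>
    let cm' := max cm (c.getD s 0)
    let dm' := max dm (d.getD s 0)
    buildDown c d k' (s - 1) cm' dm' (lc ++ [cm']) (ld ++ [dm'])

-- 'for t in range(mid+1, hi+1)' building the prefix-maxima lists rc, rd
def buildUp (c d : List Int) (k t : Nat) (cm dm : Int) (rc rd : List Int) :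
    List Int × List Int :=
  match k with
  | 0 => (rc, rd)
  | k' + 1 =>
    let cm' := max cm (c.getD t 0)
    let dm' := max dm (d.getD t 0)
    buildUp c d k' (t + 1) cm' dm' (rc ++ [cm']) (rd ++ [dm'])

-- the nested 'for cl, dl in zip(lc, ld): for cr, dr in zip(rc, rd)' counting loop;
-- Python's chained '-e <= x <= e' is the conjunction of the two comparisons
def crossLoop (lc ld rc rd : List Int) (e : Int) (total : Int) : Int :=
  (lc.zip ld).foldl (fun tot p =>
    (rc.zip rd).foldl (fun tot q =>
      if -e ≤ (if p.1 > q.1 then p.1 else q.1) - (if p.2 > q.2 then p.2 else q.2) ∧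
         (if p.1 > q.1 then p.1 else q.1) - (if p.2 > q.2 then p.2 else q.2) ≤ e
      then tot + 1 else tot) tot) total

-- the recursive 'count(lo, hi)'; midpoint via Python's '//'
def countB (c d : List Int) (e : Int) (lo hi : Int) : Int :=
  if hi < lo then 0
  else if _hl : lo = hi then
    (if |c.getD lo.toNat 0 - d.getD lo.toNat 0| ≤ e then 1 else 0)
  else
    let mid := PySem.Int.floordiv (lo + hi) 2
    let total := countB c d e lo mid + countB c d e (mid + 1) hi
    let L := buildDown c d (mid - lo + 1).toNat mid.toNat
               (c.getD mid.toNat 0) (d.getD mid.toNat 0) [] []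
    let R := buildUp c d (hi - mid).toNat (mid + 1).toNat
               (c.getD (mid + 1).toNat 0) (d.getD (mid + 1).toNat 0) [] []
    crossLoop L.1 L.2 R.1 R.2 e total
termination_by (hi + 1 - lo).toNat
decreasing_by
  all_goals
    have hlt : lo < hi := by omega
    have h2 : (0:Int) < 2 := by omega
    rw [PySem.Int.floordiv_eq_ediv_of_pos h2] at *
    omega

def find_fair_alt (c_skills : List Int) (d_skills : List Int) (e : Int) : Int :=
  countB c_skills d_skills e 0 ((c_skills.length : Int) - 1)

-- ===== PRECONDITION & SPEC =====
-- A indexes c_skills[0] and d_skills[end] for every end < len(c_skills):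
-- it raises IndexError unless c_skills is nonempty and d_skills is at least as long.
def Pre_find_fair (c_skills : List Int) (d_skills : List Int) (e : Int) : Prop :=
  c_skills ≠ [] ∧ c_skills.length ≤ d_skills.length
instance (c_skills : List Int) (d_skills : List Int) (e : Int) : Decidable (Pre_find_fair c_skills d_skills e) := by unfold Pre_find_fair; infer_instance

def pvWitness_find_fair : List Int × List Int × Int := ([1, 3], [2, 2], 1)

def Spec_find_fair (c_skills : List Int) (d_skills : List Int) (e : Int) (out : Int) : Prop := out = find_fair_alt c_skills d_skills e
instance (c_skills : List Int) (d_skills : List Int) (e : Int) (out : Int) : Decidable (Spec_find_fair c_skills d_skills e out) := by unfold Spec_find_fair; infer_instance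

-- ===== CLAIM (what is proved, stated in full; the proofs are below) =====
def Claim_equal_find_fair : Prop := ∀ (c_skills : List Int) (d_skills : List Int) (e : Int), Dom_find_fair c_skills d_skills e → Pre_find_fair c_skills d_skills e → Spec_find_fair c_skills d_skills e (find_fair c_skills d_skills e)

-- ===== LEMMAS AND PROOFS =====

-- max of xs[s..t] (0-defaulted out of range), written as a foldr over the index range
def Mx (xs : List Int) (s t : Nat) : Int :=
  (List.range' s (t - s)).foldr (fun i a => max (xs.getD i 0) a) (xs.getD t 0)

-- indicator of a fair subarray [s..t]
def Pind (c d : List Int) (e : Int) (s t : Nat) : Int :=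
  if |Mx c s t - Mx d s t| ≤ e then 1 else 0

def rowSum (c d : List Int) (e : Int) (n s : Nat) : Int :=
  ∑ j ∈ Finset.range (n - s), Pind c d e s (s + j)

def colSum (c d : List Int) (e : Int) (t : Nat) : Int :=
  ∑ i ∈ Finset.range (t + 1), Pind c d e i t

-- triangle sum: all subarrays [s..t] with lo ≤ s ≤ t ≤ hi
def TS (c d : List Int) (e : Int) (lo hi : Nat) : Int :=
  ∑ t ∈ Finset.Icc lo hi, ∑ s ∈ Finset.Icc lo t, Pind c d e s t

lemma updMax (a b : Int) : (if a > b then a else b) = max b a := by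
  by_cases h : a > b
  · simp [h, max_eq_right (le_of_lt h)]
  · simp [h, max_eq_left (by omega : a ≤ b)]

lemma Mx_self (xs : List Int) (t : Nat) : Mx xs t t = xs.getD t 0 := by
  simp [Mx]

lemma Mx_cons (xs : List Int) (s t : Nat) (h : s < t) :
    Mx xs s t = max (xs.getD s 0) (Mx xs (s+1) t) := by
  unfold Mx
  have h1 : t - s = (t - (s+1)) + 1 := by omega
  rw [h1, List.range'_succ, List.foldr_cons]

lemma foldr_max_max (xs : List Int) (l : List Nat) (x y : Int) :
    l.foldr (fun i a => max (xs.getD i 0) a) (max x y)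
      = max (l.foldr (fun i a => max (xs.getD i 0) a) x) y := by
  induction l with
  | nil => rfl
  | cons i l ih => rw [List.foldr_cons, List.foldr_cons, ih, ← max_assoc]

lemma Mx_snoc (xs : List Int) (s t : Nat) (h : s ≤ t) :
    Mx xs s (t+1) = max (Mx xs s t) (xs.getD (t+1) 0) := by
  unfold Mx
  have h1 : t + 1 - s = (t - s) + 1 := by omega
  rw [h1, List.range'_concat]
  have h2 : s + 1 * (t - s) = t := by omega
  rw [h2, List.foldr_append]
  simp only [List.foldr_cons, List.foldr_nil]
  exact foldr_max_max xs _ _ _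

-- splitting the window maximum at the midpoint
lemma Mx_split (xs : List Int) (s m : Nat) (hs : s ≤ m) :
    ∀ k, Mx xs s (m + 1 + k) = max (Mx xs s m) (Mx xs (m+1) (m + 1 + k)) := by
  intro k
  induction k with
  | zero => rw [Mx_snoc xs s m hs, Mx_self]
  | succ k ih =>
    have h1 : m + 1 + (k + 1) = (m + 1 + k) + 1 := by omega
    rw [h1, Mx_snoc xs s (m+1+k) (by omega), ih,
        Mx_snoc xs (m+1) (m+1+k) (by omega), max_assoc]

-- ===== A-side characterisation =====

lemma loopA_row (c d : List Int) (e : Int) (n start : Nat) :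
    ∀ m endi cMax dMax numFair, n - endi = m → endi < n → start < n → start ≤ endi →
      max cMax (c.getD endi 0) = Mx c start endi →
      max dMax (d.getD endi 0) = Mx d start endi →
      loopA c d e n start endi cMax dMax numFair =
        (if start + 1 = n then
          numFair + ∑ j ∈ Finset.range (n - endi), Pind c d e start (endi + j)
        else loopA c d e n (start+1) (start+1) (c.getD (start+1) 0) (d.getD (start+1) 0)
          (numFair + ∑ j ∈ Finset.range (n - endi), Pind c d e start (endi + j))) := by
  intro m
  induction m with
  | zero => intro endi _ _ _ h0 h1; omega
  | succ m ih =>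
    intro endi cMax dMax numFair hm h1 h2 h3 hc hd
    rw [loopA]
    simp only [h2, dif_pos, updMax, hc, hd]
    by_cases hend : endi + 1 ≥ n
    · have hn : n - endi = 1 := by omega
      rw [hn, Finset.sum_range_one, dif_pos hend]
      have hnum : (if |Mx c start endi - Mx d start endi| ≤ e then numFair + 1 else numFair)
          = numFair + Pind c d e start endi := by
        unfold Pind; split <;> omega
      rw [hnum]
      simp
    · rw [dif_neg hend]
      have hrec := ih (endi+1) (Mx c start endi) (Mx d start endi)
        (if |Mx c start endi - Mx d start endi| ≤ e then numFair + 1 else numFair)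
        (by omega) (by omega) h2 (by omega)
        (by rw [← Mx_snoc c start endi h3])
        (by rw [← Mx_snoc d start endi h3])
      rw [hrec]
      have hsum : numFair + ∑ j ∈ Finset.range (n - endi), Pind c d e start (endi + j)
          = (if |Mx c start endi - Mx d start endi| ≤ e then numFair + 1 else numFair)
            + ∑ j ∈ Finset.range (n - (endi+1)), Pind c d e start (endi + 1 + j) := by
        have hpeel : n - endi = (n - (endi+1)) + 1 := by omega
        rw [hpeel, Finset.sum_range_succ']
        have : ∀ j, Pind c d e start (endi + (j + 1)) = Pind c d e start (endi + 1 + j) := by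
          intro j; congr 1; omega
        rw [Finset.sum_congr rfl (fun j _ => this j)]
        simp only [Nat.add_zero]
        unfold Pind; split <;> omega
      rw [hsum]

lemma loopA_all (c d : List Int) (e : Int) (n : Nat) :
    ∀ k start numFair, n - start = k → start < n →
      loopA c d e n start start (c.getD start 0) (d.getD start 0) numFair =
        numFair + ∑ j ∈ Finset.range (n - start), rowSum c d e n (start + j) := by
  intro k
  induction k with
  | zero => intro start _ h0 h1; omega
  | succ k ih =>
    intro start numFair hk h1
    rw [loopA_row c d e n start (n - start) start _ _ _ rfl h1 h1 le_rfl
        (by rw [max_self, Mx_self]) (by rw [max_self, Mx_self])]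
    by_cases hlast : start + 1 = n
    · rw [if_pos hlast]
      have h2 : n - start = 1 := by omega
      rw [h2, Finset.sum_range_one, Finset.sum_range_one]
      simp only [Nat.add_zero]
      unfold rowSum
      rw [h2, Finset.sum_range_one]
      simp
    · rw [if_neg hlast]
      rw [ih (start+1) _ (by omega) (by omega)]
      have hpeel : n - start = (n - (start+1)) + 1 := by omega
      conv_rhs => rw [hpeel, Finset.sum_range_succ']
      have : ∀ j, rowSum c d e n (start + (j + 1)) = rowSum c d e n (start + 1 + j) := by
        intro j; congr 1; omega
      rw [Finset.sum_congr rfl (fun j _ => this j)]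
      unfold rowSum
      simp only [Nat.add_zero]
      omega

lemma rows_eq_cols (c d : List Int) (e : Int) (n : Nat) :
    ∑ s ∈ Finset.range n, rowSum c d e n s = ∑ t ∈ Finset.range n, colSum c d e t := by
  have hrow : ∀ s, rowSum c d e n s = ∑ t ∈ Finset.Ico s n, Pind c d e s t := by
    intro s
    rw [Finset.sum_Ico_eq_sum_range]
    rfl
  have hcol : ∀ t, colSum c d e t = ∑ s ∈ Finset.Ico 0 (t+1), Pind c d e s t := by
    intro t
    rw [colSum, Finset.range_eq_Ico]
  calc ∑ s ∈ Finset.range n, rowSum c d e n s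
      = ∑ s ∈ Finset.Ico 0 n, ∑ t ∈ Finset.Ico s n, Pind c d e s t := by
        rw [Finset.range_eq_Ico]; exact Finset.sum_congr rfl (fun s _ => hrow s)
    _ = ∑ t ∈ Finset.Ico 0 n, ∑ s ∈ Finset.Ico 0 (t+1), Pind c d e s t :=
        Finset.sum_Ico_Ico_comm 0 n (fun s t => Pind c d e s t)
    _ = ∑ t ∈ Finset.range n, colSum c d e t := by
        rw [Finset.range_eq_Ico]; exact Finset.sum_congr rfl (fun t _ => (hcol t).symm)

-- ===== B-side characterisation =====

lemma buildDown_spec (c d : List Int) (m : Nat) :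
    ∀ k s cm dm lc ld, k ≤ s + 1 → s ≤ m →
      max cm (c.getD s 0) = Mx c s m → max dm (d.getD s 0) = Mx d s m →
      buildDown c d k s cm dm lc ld
        = (lc ++ (List.range k).map (fun i => Mx c (s - i) m),
           ld ++ (List.range k).map (fun i => Mx d (s - i) m)) := by
  intro k
  induction k with
  | zero => intro s cm dm lc ld _ _ _ _; simp [buildDown]
  | succ k ih =>
    intro s cm dm lc ld hk hs hc hd
    rw [buildDown]
    simp only [hc, hd]
    have hmap : ∀ (xs : List Int),
        Mx xs s m :: (List.range k).map (fun i => Mx xs (s - 1 - i) m)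
          = (List.range (k+1)).map (fun i => Mx xs (s - i) m) := by
      intro xs
      rw [List.range_succ_eq_map, List.map_cons, List.map_map]
      simp only [Nat.sub_zero]
      congr 1
      apply List.map_congr_left
      intro i _
      simp only [Function.comp_apply]
      congr 1
      omega
    cases k with
    | zero =>
      rw [buildDown]
      rw [← hmap c, ← hmap d]
      simp
    | succ k' =>
      have hs1 : 1 ≤ s := by omega
      have h11 : s - 1 + 1 = s := by omega
      rw [ih (s-1) _ _ _ _ (by omega) (by omega)
          (by rw [Mx_cons c (s-1) m (by omega), h11, max_comm])
          (by rw [Mx_cons d (s-1) m (by omega), h11, max_comm])]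
      rw [List.append_assoc, List.append_assoc]
      rw [← hmap c, ← hmap d]
      simp

lemma buildUp_spec (c d : List Int) (base : Nat) :
    ∀ k t cm dm rc rd, base ≤ t →
      max cm (c.getD t 0) = Mx c base t → max dm (d.getD t 0) = Mx d base t →
      buildUp c d k t cm dm rc rd
        = (rc ++ (List.range k).map (fun j => Mx c base (t + j)),
           rd ++ (List.range k).map (fun j => Mx d base (t + j))) := by
  intro k
  induction k with
  | zero => intro t cm dm rc rd _ _ _; simp [buildUp]
  | succ k ih =>
    intro t cm dm rc rd ht hc hd
    rw [buildUp]
    simp only [hc, hd]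
    rw [ih (t+1) _ _ _ _ (by omega)
        (by rw [← Mx_snoc c base t ht])
        (by rw [← Mx_snoc d base t ht])]
    have hmap : ∀ (xs : List Int),
        Mx xs base t :: (List.range k).map (fun j => Mx xs base (t + 1 + j))
          = (List.range (k+1)).map (fun j => Mx xs base (t + j)) := by
      intro xs
      rw [List.range_succ_eq_map, List.map_cons, List.map_map]
      simp only [Nat.add_zero]
      congr 1
      apply List.map_congr_left
      intro j _
      simp only [Function.comp_apply]
      congr 1
      omega
    rw [List.append_assoc, List.append_assoc, ← hmap c, ← hmap d]
    simp

lemma foldl_indicator (g : Nat → Prop) [DecidablePred g] :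
    ∀ (n : Nat) (init : Int),
      (List.range n).foldl (fun tot j => if g j then tot + 1 else tot) init
        = init + ∑ j ∈ Finset.range n, (if g j then (1:Int) else 0) := by
  intro n
  induction n with
  | zero => intro init; simp
  | succ n ih =>
    intro init
    rw [List.range_succ, List.foldl_append, ih, Finset.sum_range_succ]
    simp only [List.foldl_cons, List.foldl_nil]
    split <;> omega

lemma crossLoop_spec (f g F G : Nat → Int) (K M : Nat) (e : Int) (total : Int) :
    crossLoop ((List.range K).map f) ((List.range K).map g)
              ((List.range M).map F) ((List.range M).map G) e total
      = total + ∑ i ∈ Finset.range K, ∑ j ∈ Finset.range M,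
          (if |max (f i) (F j) - max (g i) (G j)| ≤ e then (1:Int) else 0) := by
  unfold crossLoop
  rw [List.zip_map', List.zip_map', List.foldl_map]
  simp only [List.foldl_map, updMax, ← abs_le, max_comm]
  induction K with
  | zero => simp
  | succ n ih =>
    rw [List.range_succ, List.foldl_append, ih, Finset.sum_range_succ]
    simp only [List.foldl_cons, List.foldl_nil]
    rw [foldl_indicator]
    omega

lemma Icc_eq_Ico_succ (a b : Nat) : Finset.Icc a b = Finset.Ico a (b + 1) := by
  ext x
  simp only [Finset.mem_Icc, Finset.mem_Ico]
  omega

lemma sum_range_up (f : Nat → Int) (a b : Nat) :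
    ∑ j ∈ Finset.range (b + 1 - a), f (a + j) = ∑ t ∈ Finset.Icc a b, f t := by
  rw [Icc_eq_Ico_succ, Finset.sum_Ico_eq_sum_range]

lemma sum_range_down (f : Nat → Int) (a b : Nat) (hab : a ≤ b) :
    ∑ i ∈ Finset.range (b - a + 1), f (b - i) = ∑ s ∈ Finset.Icc a b, f s := by
  refine Finset.sum_nbij' (fun i => b - i) (fun s => b - s) ?_ ?_ ?_ ?_ ?_ <;>
    intro x hx <;> simp only [Finset.mem_range, Finset.mem_Icc] at * <;>
    first | rfl | omega

-- triangle decomposition at the midpoint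
lemma TS_split (c d : List Int) (e : Int) (lo m hi : Nat)
    (h1 : lo ≤ m) (h2 : m < hi) :
    TS c d e lo hi = TS c d e lo m + TS c d e (m+1) hi
      + ∑ s ∈ Finset.Icc lo m, ∑ t ∈ Finset.Icc (m+1) hi, Pind c d e s t := by
  unfold TS
  have hsplit : ∑ t ∈ Finset.Icc lo hi, ∑ s ∈ Finset.Icc lo t, Pind c d e s t
      = (∑ t ∈ Finset.Icc lo m, ∑ s ∈ Finset.Icc lo t, Pind c d e s t)
        + ∑ t ∈ Finset.Icc (m+1) hi, ∑ s ∈ Finset.Icc lo t, Pind c d e s t := by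
    rw [Icc_eq_Ico_succ lo hi, Icc_eq_Ico_succ lo m, Icc_eq_Ico_succ (m+1) hi,
        ← Finset.sum_Ico_consecutive _ (by omega : lo ≤ m + 1) (by omega : m + 1 ≤ hi + 1)]
  rw [hsplit]
  have hinner : ∀ t ∈ Finset.Icc (m+1) hi,
      ∑ s ∈ Finset.Icc lo t, Pind c d e s t
        = (∑ s ∈ Finset.Icc lo m, Pind c d e s t) + ∑ s ∈ Finset.Icc (m+1) t, Pind c d e s t := by
    intro t ht
    have htm : m + 1 ≤ t := (Finset.mem_Icc.mp ht).1
    rw [Icc_eq_Ico_succ lo t, Icc_eq_Ico_succ lo m, Icc_eq_Ico_succ (m+1) t,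
        ← Finset.sum_Ico_consecutive _ (by omega : lo ≤ m + 1) (by omega : m + 1 ≤ t + 1)]
  rw [Finset.sum_congr rfl hinner, Finset.sum_add_distrib, Finset.sum_comm]
  ring

set_option maxHeartbeats 1000000 in
lemma countB_spec (c d : List Int) (e : Int) :
    ∀ (n lo hi : Nat), hi + 1 - lo ≤ n →
      countB c d e (lo : Int) (hi : Int) = TS c d e lo hi := by
  intro n
  induction n with
  | zero =>
    intro lo hi hn
    have hlt : hi < lo := by omega
    rw [countB, if_pos (by exact_mod_cast hlt)]
    unfold TS
    rw [Finset.Icc_eq_empty (by omega)]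
    simp
  | succ n ih =>
    intro lo hi hn
    by_cases hlt : hi < lo
    · rw [countB, if_pos (by exact_mod_cast hlt)]
      unfold TS
      rw [Finset.Icc_eq_empty (by omega)]
      simp
    · by_cases heq : lo = hi
      · subst heq
        rw [countB, if_neg (lt_irrefl ((lo:Int))), dif_pos rfl, Int.toNat_natCast]
        unfold TS
        rw [Finset.Icc_self, Finset.sum_singleton, Finset.Icc_self, Finset.sum_singleton]
        unfold Pind
        rw [Mx_self, Mx_self]
      · -- lo < hi
        have hlohi : lo < hi := by omega
        rw [countB]
        rw [if_neg (by exact_mod_cast hlt), dif_neg (by exact_mod_cast heq)]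
        have h2 : (0:Int) < 2 := by omega
        set midI := PySem.Int.floordiv ((lo:Int) + (hi:Int)) 2 with hmidI
        have hmidE : midI = ((lo:Int) + (hi:Int)) / 2 := by
          rw [hmidI, PySem.Int.floordiv_eq_ediv_of_pos h2]
        obtain ⟨m, hm⟩ : ∃ m : Nat, midI = (m : Int) :=
          ⟨midI.toNat, by rw [hmidE]; omega⟩
        have hmlo : lo ≤ m := by rw [hm] at hmidE; omega
        have hmhi : m < hi := by rw [hm] at hmidE; omega
        simp only [hm]
        have hc1 : ((m:Int) + 1) = ((m+1 : Nat) : Int) := by push_cast; ring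
        rw [hc1, ih lo m (by omega), ih (m+1) hi (by omega)]
        have ht1 : ((m:Int) - (lo:Int) + 1).toNat = m - lo + 1 := by omega
        have ht2 : ((m:Int)).toNat = m := by omega
        have ht3 : ((hi:Int) - (m:Int)).toNat = hi - m := by omega
        have ht4 : ((m+1 : Nat) : Int).toNat = m + 1 := by omega
        rw [ht1, ht2, ht3, ← hc1, hc1, ht4]
        rw [buildDown_spec c d m (m - lo + 1) m _ _ [] [] (by omega) le_rfl
            (by rw [max_self, Mx_self]) (by rw [max_self, Mx_self])]
        rw [buildUp_spec c d (m+1) (hi - m) (m+1) _ _ [] [] le_rfl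
            (by rw [max_self, Mx_self]) (by rw [max_self, Mx_self])]
        simp only [List.nil_append]
        rw [crossLoop_spec]
        have hcross : ∑ i ∈ Finset.range (m - lo + 1), ∑ j ∈ Finset.range (hi - m),
            (if |max (Mx c (m - i) m) (Mx c (m+1) (m + 1 + j))
                 - max (Mx d (m - i) m) (Mx d (m+1) (m + 1 + j))| ≤ e
             then (1:Int) else 0)
            = ∑ s ∈ Finset.Icc lo m, ∑ t ∈ Finset.Icc (m+1) hi, Pind c d e s t := by
          have hstep : ∀ i ∈ Finset.range (m - lo + 1), ∀ j ∈ Finset.range (hi - m),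
              (if |max (Mx c (m - i) m) (Mx c (m+1) (m + 1 + j))
                   - max (Mx d (m - i) m) (Mx d (m+1) (m + 1 + j))| ≤ e
               then (1:Int) else 0)
                = Pind c d e (m - i) (m + 1 + j) := by
            intro i hi' j hj'
            unfold Pind
            rw [Mx_split c (m - i) m (by omega) j, Mx_split d (m - i) m (by omega) j]
          calc ∑ i ∈ Finset.range (m - lo + 1), ∑ j ∈ Finset.range (hi - m), _
              = ∑ i ∈ Finset.range (m - lo + 1), ∑ j ∈ Finset.range (hi - m),
                  Pind c d e (m - i) (m + 1 + j) := by
                apply Finset.sum_congr rfl; intro i hi'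
                apply Finset.sum_congr rfl; intro j hj'
                exact hstep i hi' j hj'
            _ = ∑ i ∈ Finset.range (m - lo + 1), ∑ t ∈ Finset.Icc (m+1) hi,
                  Pind c d e (m - i) t := by
                apply Finset.sum_congr rfl; intro i _
                have := sum_range_up (fun t => Pind c d e (m - i) t) (m+1) hi
                have hc2 : hi + 1 - (m + 1) = hi - m := by omega
                rw [← this, hc2]
            _ = ∑ s ∈ Finset.Icc lo m, ∑ t ∈ Finset.Icc (m+1) hi, Pind c d e s t := by
                exact sum_range_down (fun s => ∑ t ∈ Finset.Icc (m+1) hi, Pind c d e s t) lo m hmlo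
        rw [hcross, TS_split c d e lo m hi hmlo hmhi]

lemma find_fair_eq (c d : List Int) (e : Int) : find_fair c d e = find_fair_alt c d e := by
  unfold find_fair find_fair_alt
  rcases Nat.eq_zero_or_pos c.length with h0 | hpos
  · rw [h0, loopA, countB]
    simp
  · have hn : (c.length : Int) - 1 = ((c.length - 1 : Nat) : Int) := by omega
    have hB := countB_spec c d e (c.length - 1 + 1) 0 (c.length - 1) (by omega)
    norm_num at hB
    rw [hn, hB, loopA_all c d e c.length (c.length - 0) 0 0 rfl hpos]
    simp only [Nat.sub_zero, zero_add]
    rw [rows_eq_cols]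
    unfold TS
    have hIcc : Finset.Icc 0 (c.length - 1) = Finset.range c.length := by
      rw [Icc_eq_Ico_succ, Finset.range_eq_Ico]
      congr 1
      omega
    rw [hIcc]
    apply Finset.sum_congr rfl
    intro t _
    unfold colSum
    rw [Icc_eq_Ico_succ, Finset.range_eq_Ico]

-- ===== VERDICT (by name: the statement is the Claim_ definition above) =====
theorem find_fair_spec : Claim_equal_find_fair := by
  intro c d e _ _
  unfold Spec_find_fair
  exact find_fair_eq c d e
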